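-- pv_equiv track=rewrite | github.com/statisticsnorway/tech-coach-stat | src/notebooks/a_collect_data.py | get_weather_stations_ids
-- ===== SOURCE A (Python) =====
-- from typing import Any
--
-- def get_weather_stations_ids(
--     weather_stations_names: list[str], weather_stations: list[dict[str, Any]]
-- ) -> list[str]:
--     """Find source ids for the provided source names (observation locations).
--
--     Args:
--         weather_stations_names: List of observation locations to find ids for.
--         weather_stations: List of dictionaries for looking up source ids.
--
--     Returns:
--         A list of ids corresponding to the provided weather stations names.
--     """
--     # Create a dictionary for quick lookup of names to ids
--     name_to_id = {
--         item["name"]: item["id"]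
--         for item in weather_stations
--         if "name" in item and "id" in item
--     }
--     return [name_to_id[name] for name in weather_stations_names]
-- ===== SOURCE B (Python) =====
-- def get_weather_stations_ids(weather_stations_names, weather_stations):
--     """Slot-filling pass: scan stations once (outer loop), overwriting the answer
--     slot of every matching requested name; forward overwrite = last wins."""
--     ids = [None] * len(weather_stations_names)
--     for item in weather_stations:
--         if "name" in item and "id" in item:
--             nm = item["name"]
--             sid = item["id"]
--             for j, name in enumerate(weather_stations_names):
--                 if name == nm:
--                     ids[j] = sid
--     for j, v in enumerate(ids):
--         if v is None:
--             raise KeyError(weather_stations_names[j])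
--     return ids
-- ===== Notes on version B (the rewrite author's own statement) =====
-- stated objective: alternative
-- what changed: B inverts the traversal: no name->id dict is built; instead a single forward pass over the stations overwrites an answer slot per requested name (forward overwrite reproduces A's last-wins dict semantics), and an unfilled slot raises KeyError like A.
import Mathlib
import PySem

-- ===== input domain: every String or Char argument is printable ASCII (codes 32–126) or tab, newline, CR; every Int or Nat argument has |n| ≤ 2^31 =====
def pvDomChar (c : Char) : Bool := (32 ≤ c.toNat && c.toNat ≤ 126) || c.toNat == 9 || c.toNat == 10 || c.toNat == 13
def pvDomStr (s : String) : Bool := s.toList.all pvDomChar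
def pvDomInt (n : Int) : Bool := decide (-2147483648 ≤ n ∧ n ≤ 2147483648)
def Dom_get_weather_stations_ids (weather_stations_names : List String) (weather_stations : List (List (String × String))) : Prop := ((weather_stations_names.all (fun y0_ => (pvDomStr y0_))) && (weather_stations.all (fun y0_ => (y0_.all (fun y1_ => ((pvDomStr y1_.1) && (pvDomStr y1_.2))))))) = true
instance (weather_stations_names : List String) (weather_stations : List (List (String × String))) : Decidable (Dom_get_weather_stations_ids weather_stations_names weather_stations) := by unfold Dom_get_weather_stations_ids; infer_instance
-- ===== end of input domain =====

-- B replaces A's dict-then-lookup with an inverted traversal: one forward pass over the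
-- stations overwrites an answer slot per requested name (forward overwrite = last wins).
-- Equivalence of the RETURN values is proved on Pre_ (the inputs where Python A does not raise KeyError).

-- first-match lookup in an item (a Python dict modelled as an assoc list): item["k"] / "k" in item
def pvItemGet (item : List (String × String)) (k : String) : Option String :=
  (item.find? (fun p => p.1 == k)).map (·.2)

-- ===== PORT A =====
-- the dict comprehension: repeated insert (last occurrence of a name overwrites)
def pvStepA (d : PySem.Dict String String) (item : List (String × String)) : PySem.Dict String String :=
  match pvItemGet item "name", pvItemGet item "id" with
  | some nm, some id => d.insert nm id
  | _, _ => d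

def get_weather_stations_ids (weather_stations_names : List String) (weather_stations : List (List (String × String))) : List String :=
  let name_to_id := weather_stations.foldl pvStepA PySem.Dict.empty
  -- name_to_id[name]: KeyError (get? = none) is excluded by Pre_; getD "" is a dummy there
  weather_stations_names.map (fun name => (name_to_id.get? name).getD "")

-- ===== PORT B =====
-- one station item updates the slot list: every slot whose name matches is overwritten
def pvStepB (weather_stations_names : List String) (ids : List (Option String)) (item : List (String × String)) : List (Option String) :=
  match pvItemGet item "name", pvItemGet item "id" with
  | some nm, some sid =>
      (weather_stations_names.zip ids).map (fun p => if p.1 == nm then some sid else p.2)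
  | _, _ => ids

def get_weather_stations_ids_alt (weather_stations_names : List String) (weather_stations : List (List (String × String))) : List String :=
  let ids := weather_stations.foldl (pvStepB weather_stations_names)
      (weather_stations_names.map (fun _ => none))
  -- a slot left None means Python B raises KeyError; excluded by Pre_, getD "" is a dummy there
  ids.map (fun v => v.getD "")

-- ===== PRECONDITION & SPEC =====
-- Pre_ excludes exactly the inputs where Python A raises KeyError (a requested name with no
-- station item carrying both "name" (equal to it) and "id"); Python B raises KeyError there too.
def Pre_get_weather_stations_ids (weather_stations_names : List String) (weather_stations : List (List (String × String))) : Prop :=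
  ∀ n ∈ weather_stations_names,
    weather_stations.any (fun item => pvItemGet item "name" == some n && (pvItemGet item "id").isSome) = true
instance (weather_stations_names : List String) (weather_stations : List (List (String × String))) : Decidable (Pre_get_weather_stations_ids weather_stations_names weather_stations) := by unfold Pre_get_weather_stations_ids; infer_instance

def pvWitness_get_weather_stations_ids : List String × (List (List (String × String))) :=
  (["x", "y"], [[("name", "x"), ("id", "1")], [("name", "y"), ("id", "2")], [("name", "x"), ("id", "3")]])

def Spec_get_weather_stations_ids (weather_stations_names : List String) (weather_stations : List (List (String × String))) (out : List String) : Prop := out = get_weather_stations_ids_alt weather_stations_names weather_stations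
instance (weather_stations_names : List String) (weather_stations : List (List (String × String))) (out : List String) : Decidable (Spec_get_weather_stations_ids weather_stations_names weather_stations out) := by unfold Spec_get_weather_stations_ids; infer_instance

-- ===== CLAIM (what is proved, stated in full; the proofs are below) =====
def Claim_equal_get_weather_stations_ids : Prop := ∀ (weather_stations_names : List String) (weather_stations : List (List (String × String))), Dom_get_weather_stations_ids weather_stations_names weather_stations → Pre_get_weather_stations_ids weather_stations_names weather_stations → Spec_get_weather_stations_ids weather_stations_names weather_stations (get_weather_stations_ids weather_stations_names weather_stations)

-- ===== LEMMAS AND PROOFS =====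

-- zipping a list with its own image collapses to a single map
theorem zip_map_self {α β : Type} (l : List α) (f : α → β) :
    l.zip (l.map f) = l.map (fun a => (a, f a)) := by
  induction l with
  | nil => rfl
  | cons a l ih => simp [ih]

-- one station step: B's slot update mirrors A's dict insert, slot-wise
theorem pvStepB_map (names : List String) (d : PySem.Dict String String) (item : List (String × String)) :
    pvStepB names (names.map (fun n => d.get? n)) item
      = names.map (fun n => (pvStepA d item).get? n) := by
  unfold pvStepB pvStepA
  cases hnm : pvItemGet item "name" with
  | none => simp
  | some nm =>
    cases hid : pvItemGet item "id" with
    | none => simp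
    | some sid =>
      simp only [zip_map_self, List.map_map]
      refine List.map_congr_left (fun n _ => ?_)
      simp only [Function.comp, PySem.Dict.get?_insert]
      by_cases h : n = nm
      · simp [h]
      · have : (nm == n) = false := by simp [Ne.symm h]
        simp [h]

-- B's whole fold keeps the invariant "slot j = A's dict entry for names[j]"
theorem pvFoldB_map (names : List String) (l : List (List (String × String))) (d : PySem.Dict String String) :
    l.foldl (pvStepB names) (names.map (fun n => d.get? n))
      = names.map (fun n => (l.foldl pvStepA d).get? n) := by
  induction l generalizing d with
  | nil => rfl
  | cons a l ih => simp only [List.foldl_cons, pvStepB_map, ih]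

-- ===== VERDICT (by name: the statement is the Claim_ definition above) =====
theorem get_weather_stations_ids_spec : Claim_equal_get_weather_stations_ids := by
  intro names stations _ _
  unfold Spec_get_weather_stations_ids get_weather_stations_ids get_weather_stations_ids_alt
  have h0 : names.map (fun _ => (none : Option String))
      = names.map (fun n => (PySem.Dict.empty : PySem.Dict String String).get? n) := by
    simp
  simp only [h0, pvFoldB_map, List.map_map]
  rfl
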